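-- pv_equiv track=rewrite | github.com/YL1118/extract-name-id-date | extractor.py | find_label_positions
-- ===== SOURCE A (Python) =====
-- def find_label_positions(lines: list[str], label_list: list[str]):
--     hits = []
--     for li, line in enumerate(lines):
--         for lab in label_list:
--             idx = line.find(lab)
--             if idx != -1:
--                 hits.append((li, idx, lab))
--     return hits
-- ===== SOURCE B (Python) =====
-- def find_label_positions(lines: list[str], label_list: list[str]):
--     # Position-major scan: walk each line once left-to-right, recording the FIRST
--     # position of every label in a dict, then emit hits in label_list order.
--     hits = []
--     for li, line in enumerate(lines):
--         first = {}
--         for i in range(len(line) + 1):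
--             for lab in label_list:
--                 if lab not in first and line.startswith(lab, i):
--                     first[lab] = i
--         for lab in label_list:
--             if lab in first:
--                 hits.append((li, first[lab], lab))
--     return hits
-- ===== Notes on version B (the rewrite author's own statement) =====
-- stated objective: alternative
-- what changed: A runs line.find for every label (label-major); B walks each line position-by-position once, recording the first position of every label in a dict, then emits hits in label order.
import Mathlib
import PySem

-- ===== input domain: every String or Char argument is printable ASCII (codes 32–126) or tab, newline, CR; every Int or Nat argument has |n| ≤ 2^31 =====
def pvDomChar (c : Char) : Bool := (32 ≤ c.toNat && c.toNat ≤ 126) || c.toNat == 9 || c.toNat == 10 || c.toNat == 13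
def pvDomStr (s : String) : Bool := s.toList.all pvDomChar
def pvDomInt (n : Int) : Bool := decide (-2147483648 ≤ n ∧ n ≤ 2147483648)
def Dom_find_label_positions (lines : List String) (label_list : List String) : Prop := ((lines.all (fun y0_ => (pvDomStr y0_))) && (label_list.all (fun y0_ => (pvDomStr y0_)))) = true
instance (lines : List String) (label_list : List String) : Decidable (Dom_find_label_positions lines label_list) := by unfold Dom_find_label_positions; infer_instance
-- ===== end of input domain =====

-- B replaces the label-major `line.find` loop by a single position-major left-to-right scan
-- of each line that records the FIRST hit of every label in a dict (objective: alternative).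

-- ===== PORT A =====
def find_label_positions (lines : List String) (label_list : List String) : List (Int × Int × String) :=
  (PySem.List.enumerate lines).foldl (fun hits p =>
    label_list.foldl (fun hits lab =>
      let idx := PySem.Str.find p.2 lab
      if idx ≠ -1 then hits ++ [(p.1, idx, lab)] else hits) hits) []

-- ===== PORT B =====
-- one position i of the scan: try every not-yet-found label at offset i
-- (`line.startswith(lab, i)` with 0 ≤ i is exactly the prefix test on `cs.drop i.toNat`)
def fbAltStep (cs : List Char) (label_list : List String) (d : PySem.Dict String Int) (i : Int) : PySem.Dict String Int :=
  label_list.foldl (fun d lab =>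
    if !d.contains lab && PySem.Chars.startswith (cs.drop i.toNat) lab.toList
    then d.insert lab i else d) d

-- the `for i in range(len(line) + 1)` scan building the first-hit dict
def fbAltFirst (cs : List Char) (label_list : List String) : PySem.Dict String Int :=
  (PySem.List.pyRange 0 ((cs.length : Int) + 1)).foldl (fbAltStep cs label_list) PySem.Dict.empty

def find_label_positions_alt (lines : List String) (label_list : List String) : List (Int × Int × String) :=
  (PySem.List.enumerate lines).foldl (fun hits p =>
    let first := fbAltFirst p.2.toList label_list
    label_list.foldl (fun hits lab =>
      match first.get? lab with
      | some v => hits ++ [(p.1, v, lab)]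
      | none => hits) hits) []

-- ===== PRECONDITION & SPEC =====
def Spec_find_label_positions (lines : List String) (label_list : List String) (out : List (Int × Int × String)) : Prop := out = find_label_positions_alt lines label_list
instance (lines : List String) (label_list : List String) (out : List (Int × Int × String)) : Decidable (Spec_find_label_positions lines label_list out) := by unfold Spec_find_label_positions; infer_instance

-- ===== CLAIM (what is proved, stated in full; the proofs are below) =====
def Claim_equal_find_label_positions : Prop := ∀ (lines : List String) (label_list : List String), Dom_find_label_positions lines label_list → Spec_find_label_positions lines label_list (find_label_positions lines label_list)

-- ===== LEMMAS AND PROOFS =====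

-- lookup after one position of the scan
lemma fbAltStep_get? (cs : List Char) (ll : List String) (d : PySem.Dict String Int) (i : Int) (lab : String) :
    (fbAltStep cs ll d i).get? lab =
      if lab ∈ ll ∧ d.get? lab = none ∧ PySem.Chars.startswith (cs.drop i.toNat) lab.toList = true
      then some i else d.get? lab := by
  induction ll generalizing d with
  | nil => simp [fbAltStep]
  | cons x xs ih =>
    simp only [fbAltStep, List.foldl_cons] at ih ⊢
    rw [ih]
    by_cases hx : lab = x
    · subst hx
      by_cases hd : d.get? lab = none
      · by_cases hp : PySem.Chars.startswith (cs.drop i.toNat) lab.toList = true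
        · simp [PySem.Dict.contains_eq_isSome_get?, hd, hp, PySem.Dict.get?_insert_self]
        · simp [PySem.Dict.contains_eq_isSome_get?, hd, hp]
      · have : (d.get? lab).isSome = true := Option.isSome_iff_ne_none.mpr hd
        simp [PySem.Dict.contains_eq_isSome_get?, this, hd]
    · have hgx : (if !d.contains x && PySem.Chars.startswith (cs.drop i.toNat) x.toList
          then d.insert x i else d).get? lab = d.get? lab := by
        split
        · exact PySem.Dict.get?_insert_of_ne _ _ hx
        · rfl
      rw [hgx]
      simp [hx]

-- lookup after scanning a list of positions: first position where the label matches
lemma fbAltScan_get? (cs : List Char) (ll : List String) (L : List Int) (d : PySem.Dict String Int)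
    (lab : String) (hmem : lab ∈ ll) :
    (L.foldl (fbAltStep cs ll) d).get? lab =
      match d.get? lab with
      | some v => some v
      | none => L.find? (fun i => PySem.Chars.startswith (cs.drop i.toNat) lab.toList) := by
  induction L generalizing d with
  | nil => cases h : d.get? lab <;> simp [h]
  | cons i L' ih =>
    simp only [List.foldl_cons]
    rw [ih]
    rw [fbAltStep_get?]
    by_cases hd : d.get? lab = none
    · by_cases hp : PySem.Chars.startswith (cs.drop i.toNat) lab.toList = true
      · simp [hmem, hd, hp, List.find?]
      · have hp' : PySem.Chars.startswith (cs.drop i.toNat) lab.toList = false := by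
          simpa using hp
        simp [hmem, hd, hp', List.find?]
    · obtain ⟨v, hv⟩ := Option.ne_none_iff_exists'.mp hd
      simp [hv]

-- the finished dict answers exactly what Python's line.find answers
lemma fbAltFirst_get? (cs : List Char) (ll : List String) (lab : String) (hmem : lab ∈ ll) :
    (fbAltFirst cs ll).get? lab =
      if PySem.Chars.find cs lab.toList = -1 then none else some (PySem.Chars.find cs lab.toList) := by
  unfold fbAltFirst
  have hcast : ((cs.length : Int) + 1) = ((cs.length + 1 : Nat) : Int) := by push_cast; ring
  rw [hcast, PySem.List.pyRange_zero_natCast]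
  rw [fbAltScan_get? cs ll _ _ lab hmem]
  simp only [PySem.Dict.get?_empty]
  rw [List.find?_map]
  have hpred : ∀ k : Nat,
      ((fun i => PySem.Chars.startswith (List.drop i.toNat cs) lab.toList) ∘ (fun k : Nat => (k : Int))) k
        = lab.toList.isPrefixOf (cs.drop k) := by
    intro k
    simp [PySem.Chars.startswith, Function.comp]
  split
  · -- no occurrence
    rename_i hne
    have hinf : ¬ lab.toList <:+: cs := (PySem.Chars.find_eq_neg_one_iff cs lab.toList).mp hne
    have hnoj : ∀ j, ¬ lab.toList <+: cs.drop j := by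
      intro j hj
      exact hinf ((PySem.Chars.isIn_iff_infix _ _).mp
        ((PySem.Chars.exists_prefix_drop_iff_isIn lab.toList cs).mp ⟨j, hj⟩))
    have : List.find? ((fun i => PySem.Chars.startswith (List.drop i.toNat cs) lab.toList) ∘ (fun k : Nat => (k : Int)))
        (List.range (cs.length + 1)) = none := by
      rw [List.find?_eq_none]
      intro k _
      rw [hpred k]
      simp only [Bool.not_eq_true]
      exact (Bool.not_eq_true _).mp (by
        intro h
        exact hnoj k (List.isPrefixOf_iff_prefix.mp h))
    simp [this]
  · -- first occurrence at k = (find).toNat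
    rename_i hne
    have hge : 0 ≤ PySem.Chars.find cs lab.toList := by
      rcases lt_or_ge (PySem.Chars.find cs lab.toList) 0 with h | h
      · exfalso; exact hne (le_antisymm (by omega) (PySem.Chars.neg_one_le_find cs lab.toList))
      · exact h
    obtain ⟨hpre, hmin⟩ := PySem.Chars.find_spec (s := cs) (sub := lab.toList) hge
    set k := (PySem.Chars.find cs lab.toList).toNat with hk
    have hkle : k ≤ cs.length := by
      have := PySem.Chars.find_le_length cs lab.toList
      omega
    have hsplit : List.range (cs.length + 1)
        = List.range k ++ List.map (fun x => k + x) (List.range (cs.length + 1 - k)) := by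
      rw [← List.range_add]
      congr 1
      omega
    rw [hsplit, List.find?_append]
    have h1 : List.find? ((fun i => PySem.Chars.startswith (List.drop i.toNat cs) lab.toList) ∘ (fun k : Nat => (k : Int)))
        (List.range k) = none := by
      rw [List.find?_eq_none]
      intro j hj
      rw [hpred j]
      simp only [Bool.not_eq_true]
      exact (Bool.not_eq_true _).mp (by
        intro h
        exact hmin j (List.mem_range.mp hj) (List.isPrefixOf_iff_prefix.mp h))
    rw [h1, Option.none_or]
    have hsucc : cs.length + 1 - k = (cs.length - k) + 1 := by omega
    rw [hsucc, List.range_succ_eq_map]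
    have hhead : ((fun i => PySem.Chars.startswith (List.drop i.toNat cs) lab.toList) ∘ (fun k : Nat => (k : Int))) (k + 0) = true := by
      rw [hpred]
      simp only [Nat.add_zero]
      exact List.isPrefixOf_iff_prefix.mpr hpre
    simp only [List.map_cons, List.find?_cons, hhead]
    simp only [Nat.add_zero]
    simp
    omega

-- the per-line output folds of A and B agree
lemma perLine_eq (ll : List String) (li : Int) (line : String) (hits : List (Int × Int × String)) :
    ll.foldl (fun hits lab =>
      let idx := PySem.Str.find line lab
      if idx ≠ -1 then hits ++ [(li, idx, lab)] else hits) hits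
    = ll.foldl (fun hits lab =>
      match (fbAltFirst line.toList ll).get? lab with
      | some v => hits ++ [(li, v, lab)]
      | none => hits) hits := by
  apply PySem.List.foldl_congr_mem
  intro acc lab hlab
  rw [fbAltFirst_get? line.toList ll lab hlab]
  simp only [PySem.Str.find_eq]
  by_cases h : PySem.Chars.find line.toList lab.toList = -1
  · simp [h]
  · simp [h]

-- ===== VERDICT (by name: the statement is the Claim_ definition above) =====
theorem find_label_positions_spec : Claim_equal_find_label_positions := by
  intro lines label_list _
  unfold Spec_find_label_positions find_label_positions find_label_positions_alt
  apply PySem.List.foldl_congr_mem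
  intro acc p _
  exact perLine_eq label_list p.1 p.2 acc
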